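-- pv_equiv track=rewrite | github.com/Egortrod/practice | del.py | to_del
-- ===== SOURCE A (Python) =====
-- from collections import defaultdict
--
-- def to_del(data):
--     dic = defaultdict(list)
--     for index, word in enumerate(data):
--         dic[word].append(index)
--     out = ''
--     for key, item in dic.items():
--         out += f'{key}: {item}\n'
--     return out[:-1]
-- ===== SOURCE B (Python) =====
-- def to_del(data):
--     keys = list(dict.fromkeys(data))
--     parts = [f'{k}: {[i for i, x in enumerate(data) if x == k]}' for k in keys]
--     return '\n'.join(parts)
-- ===== Notes on version B (the rewrite author's own statement) =====
-- stated objective: alternative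
-- what changed: Replaces the single-pass defaultdict accumulation plus trailing-newline trimming with computing the unique words in first-appearance order and re-scanning the input per word for its indices, joining the lines with '\n'.
import Mathlib
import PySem

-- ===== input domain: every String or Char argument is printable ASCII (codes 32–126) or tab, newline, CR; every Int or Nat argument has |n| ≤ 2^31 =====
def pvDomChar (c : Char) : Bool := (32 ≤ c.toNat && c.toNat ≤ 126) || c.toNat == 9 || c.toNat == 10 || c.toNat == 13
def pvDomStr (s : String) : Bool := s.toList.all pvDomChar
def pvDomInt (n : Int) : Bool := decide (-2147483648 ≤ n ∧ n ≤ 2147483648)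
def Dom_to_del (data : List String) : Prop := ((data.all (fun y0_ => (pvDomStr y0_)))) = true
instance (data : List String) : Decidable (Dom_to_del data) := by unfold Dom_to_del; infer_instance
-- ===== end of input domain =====

-- B builds each group by re-scanning the input per unique word and joins the lines,
-- instead of A's defaultdict accumulation followed by trailing-newline trimming (objective: alternative).

-- shared helper: the f-string 'f"{key}: {item}"' for a string key and an int-list item
def pvEntry (k : String) (is : List Int) : List Char :=
  k.toList ++ ':' :: ' ' :: '[' :: (PySem.Chars.join [',', ' '] (is.map PySem.Int.toChars) ++ [']'])

-- ===== PORT A =====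
def to_del (data : List String) : String :=
  let dic := (PySem.List.enumerate data 0).foldl
      (fun d p => d.modify p.2 [] (fun l => l ++ [p.1])) PySem.Dict.empty
  let out := dic.items.foldl (fun acc kv => acc ++ pvEntry kv.1 kv.2 ++ ['\n']) []
  String.mk (PySem.List.slice out none (some (-1)))

-- ===== PORT B =====
def to_del_alt (data : List String) : String :=
  let keys := PySem.List.dedup data
  String.mk (PySem.Chars.join ['\n']
    (keys.map (fun k =>
      pvEntry k (((PySem.List.enumerate data 0).filter (fun p => p.2 == k)).map (·.1)))))

-- ===== PRECONDITION & SPEC =====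
def Spec_to_del (data : List String) (out : String) : Prop := out = to_del_alt data
instance (data : List String) (out : String) : Decidable (Spec_to_del data out) := by unfold Spec_to_del; infer_instance

-- ===== CLAIM (what is proved, stated in full; the proofs are below) =====
def Claim_equal_to_del : Prop := ∀ (data : List String), Dom_to_del data → Spec_to_del data (to_del data)

-- ===== LEMMAS AND PROOFS =====

-- the dict A builds, read out as items, is exactly B's per-key grouping
lemma pv_items (data : List String) :
    ((PySem.List.enumerate data 0).foldl
      (fun d p => d.modify p.2 [] (fun l => l ++ [p.1])) PySem.Dict.empty).items
    = (PySem.List.dedup data).map (fun k =>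
        (k, ((PySem.List.enumerate data 0).filter (fun p => p.2 == k)).map (·.1))) := by
  have hnd : ((PySem.List.enumerate data 0).foldl
      (fun d p => d.modify p.2 [] (fun l => l ++ [p.1])) PySem.Dict.empty).keys.Nodup :=
    PySem.Dict.nodup_keys_foldl_modify_key _ Prod.snd [] (fun _ p l => l ++ [p.1]) _ (by simp)
  rw [PySem.Dict.items_eq_map_keys _ hnd []]
  rw [PySem.Dict.keys_foldl_modify_key _ Prod.snd [] (fun _ p l => l ++ [p.1])]
  rw [PySem.List.map_snd_enumerate]
  have hkeys : PySem.Set.update (PySem.Dict.empty (κ := String) (ν := List Int)).keys data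
      = PySem.List.dedup data := by
    simp [PySem.Set.update, PySem.Set.ofList_eq_foldl, PySem.Dict.keys_empty]
  rw [hkeys]
  refine List.map_congr_left (fun k hk => ?_)
  have := PySem.Dict.getD_foldl_modify_append
      ((PySem.List.enumerate data 0).map Prod.swap) (PySem.Dict.empty (κ := String) (ν := List Int)) k
  rw [List.foldl_map] at this
  simp only [Prod.snd_swap, Prod.fst_swap] at this
  rw [this, List.filter_map, List.map_map, PySem.Dict.getD_empty, List.nil_append]
  rfl

-- flatMap with a '\n' terminator, last char dropped, is join with '\n'
lemma pv_join (ps : List (List Char)) :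
    (ps.flatMap (fun p => p ++ ['\n'])).dropLast = PySem.Chars.join ['\n'] ps := by
  induction ps with
  | nil => rfl
  | cons p ps ih =>
    cases ps with
    | nil => simp [PySem.Chars.join, List.intercalate]
    | cons q qs =>
      rw [List.flatMap_cons, List.dropLast_append, PySem.Chars.join_cons_cons, ← ih]
      simp [List.append_assoc]

-- ===== VERDICT (by name: the statement is the Claim_ definition above) =====
theorem to_del_spec : Claim_equal_to_del := by
  intro data _
  show to_del data = to_del_alt data
  unfold to_del to_del_alt
  dsimp only
  rw [pv_items, PySem.List.slice_to_neg_one]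
  simp only [List.append_assoc]
  rw [PySem.List.foldl_append_eq_flatMap (fun (kv : String × List Int) => pvEntry kv.1 kv.2 ++ ['\n'])]
  rw [← List.flatMap_map (g := fun p => p ++ ['\n'])]
  rw [List.nil_append, pv_join, List.map_map]
  rfl
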